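-- pv_equiv track=rewrite | github.com/YuLin1226/model_predictive_control | trajectory_gen.py | splitTrajectoryWithMotionModes
-- ===== SOURCE A (Python) =====
-- def splitTrajectoryWithMotionModes(cmode):
--
--     trajectories_idx_group = []
--     from_idx, to_idx = None, None
--     current_mode = None
--     for i, mode in zip(range(len(cmode) - 1), cmode):
--
--         if from_idx is None:
--             from_idx = i
--             current_mode = mode
--
--         if current_mode != cmode[i+1]:
--             to_idx = i
--             trajectories_idx_group.append([from_idx, to_idx])
--             from_idx, to_idx = None, None
--
--     return trajectories_idx_group
-- ===== SOURCE B (Python) =====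
-- def splitTrajectoryWithMotionModes(cmode):
--     # Two-phase: first collect boundary indices, then cut segments at them.
--     # The trailing run after the last change is deliberately not emitted (matches A).
--     changes = [i for i in range(len(cmode) - 1) if cmode[i] != cmode[i + 1]]
--     segments = []
--     start = 0
--     for c in changes:
--         segments.append([start, c])
--         start = c + 1
--     return segments
-- ===== Notes on version B (the rewrite author's own statement) =====
-- stated objective: alternative
-- what changed: A's single pass with optional from_idx/current_mode state is replaced by two phases: first collect the boundary indices where cmode[i] != cmode[i+1], then cut segments at those boundaries with a running start index (still dropping the trailing run, as A does).
import Mathlib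
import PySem

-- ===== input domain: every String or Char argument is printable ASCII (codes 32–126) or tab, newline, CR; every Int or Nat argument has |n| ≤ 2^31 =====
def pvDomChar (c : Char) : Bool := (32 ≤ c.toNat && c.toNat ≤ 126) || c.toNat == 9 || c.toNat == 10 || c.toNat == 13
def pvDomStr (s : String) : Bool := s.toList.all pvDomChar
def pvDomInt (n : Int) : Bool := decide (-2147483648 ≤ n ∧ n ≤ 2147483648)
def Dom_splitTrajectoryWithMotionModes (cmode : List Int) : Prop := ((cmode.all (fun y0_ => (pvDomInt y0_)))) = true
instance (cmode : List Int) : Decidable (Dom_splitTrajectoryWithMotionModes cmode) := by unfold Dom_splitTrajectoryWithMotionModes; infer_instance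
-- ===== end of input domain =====

-- B replaces A's one-pass optional-state loop by two phases (collect change indices, then cut); alternative decomposition, same cost.

-- ===== PORT A =====
-- loop body of A: state = (trajectories_idx_group, from_idx+current_mode bundled — they are None/set together)
def stepA (cmode : List Int) (st : List (List Int) × Option (Int × Int)) (p : Int × Int) :
    List (List Int) × Option (Int × Int) :=
  let fc : Int × Int := match st.2 with
    | none => (p.1, p.2)          -- from_idx = i; current_mode = mode
    | some fc => fc
  if fc.2 ≠ PySem.List.pyGetD cmode (p.1 + 1) 0 then   -- current_mode != cmode[i+1] (index always in range here)
    (st.1 ++ [[fc.1, p.1]], none)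
  else (st.1, some fc)

def splitTrajectoryWithMotionModes (cmode : List Int) : List (List Int) :=
  (((PySem.List.pyRange 0 ((cmode.length : Int) - 1) 1).zip cmode).foldl
    (stepA cmode) ([], none)).1

-- ===== PORT B =====
def stepB (st : List (List Int) × Int) (c : Int) : List (List Int) × Int :=
  (st.1 ++ [[st.2, c]], c + 1)

def splitTrajectoryWithMotionModes_alt (cmode : List Int) : List (List Int) :=
  -- changes = the boundary indices; then cut segments at them
  (((PySem.List.pyRange 0 ((cmode.length : Int) - 1) 1).filter
      (fun i => decide (PySem.List.pyGet? cmode i ≠ PySem.List.pyGet? cmode (i + 1)))).foldl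
    stepB ([], 0)).1

-- ===== PRECONDITION & SPEC =====
def Spec_splitTrajectoryWithMotionModes (cmode : List Int) (out : List (List Int)) : Prop := out = splitTrajectoryWithMotionModes_alt cmode
instance (cmode : List Int) (out : List (List Int)) : Decidable (Spec_splitTrajectoryWithMotionModes cmode out) := by unfold Spec_splitTrajectoryWithMotionModes; infer_instance

-- ===== CLAIM (what is proved, stated in full; the proofs are below) =====
def Claim_equal_splitTrajectoryWithMotionModes : Prop := ∀ (cmode : List Int), Dom_splitTrajectoryWithMotionModes cmode → Spec_splitTrajectoryWithMotionModes cmode (splitTrajectoryWithMotionModes cmode)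

-- ===== LEMMAS AND PROOFS =====

-- the pair list A iterates over, from position k, m steps
def segPairs (cmode : List Int) (k m : Nat) : List (Int × Int) :=
  (List.range' k m).map (fun j : Nat => ((j : Int), cmode.getD j 0))

def natCond (cmode : List Int) (j : Nat) : Bool :=
  decide (cmode.getD j 0 ≠ cmode.getD (j + 1) 0)

lemma segPairs_succ (cmode : List Int) (k m : Nat) :
    segPairs cmode k (m + 1) = ((k : Int), cmode.getD k 0) :: segPairs cmode (k + 1) m := by
  rw [segPairs, List.range'_succ, List.map_cons]; rfl

lemma pyGetD_succ_nat (cmode : List Int) (k : Nat) :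
    PySem.List.pyGetD cmode ((k : Int) + 1) 0 = cmode.getD (k + 1) 0 := by
  rw [show ((k : Int) + 1) = ((k + 1 : Nat) : Int) by push_cast; ring,
      PySem.List.pyGetD_natCast]

lemma stepA_some (cmode : List Int) (acc : List (List Int)) (f cur : Int) (i x : Int) :
    stepA cmode (acc, some (f, cur)) (i, x)
      = if cur ≠ PySem.List.pyGetD cmode (i + 1) 0 then (acc ++ [[f, i]], none)
        else (acc, some (f, cur)) := rfl

-- starting a fold in the "between segments" state at position k is the same as
-- starting it with from_idx = k, current_mode = cmode[k]
lemma foldA_none (cmode : List Int) (k m : Nat) (acc : List (List Int)) :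
    ((segPairs cmode k m).foldl (stepA cmode) (acc, none)).1
      = ((segPairs cmode k m).foldl (stepA cmode) (acc, some ((k : Int), cmode.getD k 0))).1 := by
  cases m with
  | zero => rfl
  | succ m => rw [segPairs_succ, List.foldl_cons, List.foldl_cons]; rfl

-- main invariant: inside a segment started at f whose mode equals cmode[k],
-- A's remaining fold equals B's fold over the remaining change indices with start = f
lemma foldA_eq_foldB (cmode : List Int) :
    ∀ (m k f : Nat) (acc : List (List Int)),
      ((segPairs cmode k m).foldl (stepA cmode) (acc, some ((f : Int), cmode.getD k 0))).1
        = ((((List.range' k m).filter (natCond cmode)).map (fun j : Nat => (j : Int))).foldl stepB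
            (acc, (f : Int))).1 := by
  intro m
  induction m with
  | zero => intro k f acc; rfl
  | succ m ih =>
    intro k f acc
    rw [segPairs_succ, List.range'_succ, List.foldl_cons, List.filter_cons, stepA_some,
        pyGetD_succ_nat]
    by_cases h : cmode.getD k 0 = cmode.getD (k + 1) 0
    · -- no change at k: A keeps its state, B's filter drops k
      rw [if_neg (by simpa using h), show natCond cmode k = false by
            unfold natCond; rw [decide_eq_false_iff_not]; exact not_not_intro h]
      rw [if_neg (by simp), h]
      exact ih (k + 1) f acc
    · -- change at k: A appends [f, k] and resets; B appends [f, k] and sets start = k + 1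
      rw [if_pos h, show natCond cmode k = true by
            unfold natCond; rw [decide_eq_true_iff]; exact h]
      rw [if_pos rfl, List.map_cons, List.foldl_cons, foldA_none,
          show stepB (acc, (f : Int)) (k : Int) = (acc ++ [[(f : Int), (k : Int)]], (k : Int) + 1)
            from rfl,
          show ((k : Int) + 1) = ((k + 1 : Nat) : Int) by push_cast; ring]
      exact ih (k + 1) (k + 1) (acc ++ [[(f : Int), (k : Int)]])

lemma zip_eq_segPairs (cmode : List Int) :
    ((List.range (cmode.length - 1)).map (fun k : Nat => (k : Int))).zip cmode
      = segPairs cmode 0 (cmode.length - 1) := by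
  apply List.ext_getElem
  · simp [segPairs]
  · intro i h1 h2
    simp only [List.getElem_zip, List.getElem_map, List.getElem_range] at *
    simp only [segPairs, List.getElem_map, List.getElem_range']
    have hi : i < cmode.length := by simp at h1; omega
    have hz : (0 + 1 * i) = i := by omega
    rw [hz, List.getD_eq_getElem?_getD, List.getElem?_eq_getElem hi]
    rfl

lemma filter_pred_eq (cmode : List Int) :
    ((List.range (cmode.length - 1)).map (fun k : Nat => (k : Int))).filter
        (fun i => decide (PySem.List.pyGet? cmode i ≠ PySem.List.pyGet? cmode (i + 1)))
      = ((List.range (cmode.length - 1)).filter (natCond cmode)).map (fun j : Nat => (j : Int)) := by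
  rw [List.filter_map]
  congr 1
  apply List.filter_congr
  intro j hj
  simp only [List.mem_range] at hj
  have h1 : j < cmode.length := by omega
  have h2 : j + 1 < cmode.length := by omega
  have g1 : PySem.List.pyGet? cmode (j : Int) = some (cmode.getD j 0) := by
    rw [PySem.List.pyGet?_natCast, List.getD_eq_getElem?_getD, List.getElem?_eq_getElem h1]; rfl
  have g2 : PySem.List.pyGet? cmode ((j : Int) + 1) = some (cmode.getD (j + 1) 0) := by
    rw [show ((j : Int) + 1) = ((j + 1 : Nat) : Int) by push_cast; ring,
        PySem.List.pyGet?_natCast, List.getD_eq_getElem?_getD, List.getElem?_eq_getElem h2]; rfl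
  simp [Function.comp, g1, g2, natCond]

-- ===== VERDICT (by name: the statement is the Claim_ definition above) =====
theorem splitTrajectoryWithMotionModes_spec : Claim_equal_splitTrajectoryWithMotionModes := by
  intro cmode _
  unfold Spec_splitTrajectoryWithMotionModes splitTrajectoryWithMotionModes
    splitTrajectoryWithMotionModes_alt
  rw [PySem.List.pyRange_one]
  have ht : (((cmode.length : Int) - 1 - 0).toNat) = cmode.length - 1 := by omega
  simp only [zero_add, ht]
  rw [zip_eq_segPairs, filter_pred_eq, foldA_none, List.range_eq_range']
  simpa using foldA_eq_foldB cmode (cmode.length - 1) 0 0 []
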